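-- pv_equiv track=rewrite | github.com/BhavyaJain108/fashion-archive | backend/prod_page_v2/page_loader.py | _best_from_srcset
-- ===== SOURCE A (Python) =====
-- from typing import Dict, Any, Optional, List
--
-- def _best_from_srcset(srcset: str) -> Optional[str]:
--     """Pick the largest image from a srcset attribute."""
--     best_url = None
--     best_width = 0
--     for part in srcset.split(","):
--         part = part.strip()
--         pieces = part.split()
--         if len(pieces) >= 2:
--             url = pieces[0]
--             descriptor = pieces[1]
--             try:
--                 w = int(descriptor.rstrip("w"))
--                 if w > best_width:
--                     best_width = w
--                     best_url = url
--             except ValueError: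
--                 pass
--         elif len(pieces) == 1 and pieces[0].startswith("http"):
--             best_url = best_url or pieces[0]
--     return best_url
-- ===== SOURCE B (Python) =====
-- def _best_from_srcset(srcset):
--     """Pick the largest image from a srcset attribute."""
--     candidates = []
--     fallback = None
--     for part in srcset.split(","):
--         pieces = part.strip().split()
--         if len(pieces) >= 2:
--             try:
--                 w = int(pieces[1].rstrip("w"))
--             except ValueError:
--                 continue
--             if w > 0:
--                 candidates.append((w, pieces[0]))
--         elif len(pieces) == 1 and pieces[0].startswith("http") and fallback is None:
--             fallback = pieces[0]
--     if candidates: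
--         return max(candidates, key=lambda c: c[0])[1]
--     return fallback
-- ===== Notes on version B (the rewrite author's own statement) =====
-- stated objective: alternative
-- what changed: Replaces A's running-max-with-or-fallback single mutable state with a build-then-select pass: collect (width, url) candidates with width > 0 plus the first single-token http fallback, then pick via max(key=width) (first maximizer) or the fallback.
import Mathlib
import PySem

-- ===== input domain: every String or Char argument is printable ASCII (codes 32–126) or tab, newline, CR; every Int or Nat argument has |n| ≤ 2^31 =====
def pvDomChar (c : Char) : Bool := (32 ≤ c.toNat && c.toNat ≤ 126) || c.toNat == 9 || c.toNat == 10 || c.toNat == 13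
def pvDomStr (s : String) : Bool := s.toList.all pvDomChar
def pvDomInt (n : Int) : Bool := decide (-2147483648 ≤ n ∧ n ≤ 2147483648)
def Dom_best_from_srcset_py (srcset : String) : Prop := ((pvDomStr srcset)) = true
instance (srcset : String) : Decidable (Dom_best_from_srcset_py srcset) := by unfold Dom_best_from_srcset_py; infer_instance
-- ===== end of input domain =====

-- B replaces A's running-max/or-fallback state with collect-candidates-then-select; same cost, different decomposition.
-- Strings are handled as their code-point lists (PySem.Chars) and converted back at the end.

-- descriptor.rstrip("w"): drop all trailing 'w' characters (hand port; exact for a one-char strip set)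
def pvRstripW (cs : List Char) : List Char := (cs.reverse.dropWhile (· = 'w')).reverse

-- ===== PORT A =====
-- loop body of A over state (best_url, best_width)
def pvAStep (st : Option (List Char) × Int) (part : List Char) : Option (List Char) × Int :=
  let part := PySem.Chars.strip part
  let pieces := PySem.Chars.split₀ part
  if 2 ≤ pieces.length then
    let url := pieces.getD 0 []
    let descriptor := pieces.getD 1 []
    match PySem.Int.ofChars? (pvRstripW descriptor) with
    | some w => if st.2 < w then (some url, w) else st
    | none => st          -- except ValueError: pass
  else if pieces.length = 1 ∧ PySem.Chars.startswith (pieces.getD 0 []) "http".toList = true then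
    -- best_url = best_url or pieces[0]  (None and "" are falsy)
    (match st.1 with
     | some u => if u = [] then some (pieces.getD 0 []) else some u
     | none => some (pieces.getD 0 []), st.2)
  else st

def best_from_srcset_py (srcset : String) : Option String :=
  ((PySem.Chars.splitOn srcset.toList [',']).foldl pvAStep (none, 0)).1.map String.ofList

-- ===== PORT B =====
-- loop body of B over state (candidates, fallback)
def pvBStep (st : List (Int × List Char) × Option (List Char)) (part : List Char) :
    List (Int × List Char) × Option (List Char) :=
  let pieces := PySem.Chars.split₀ (PySem.Chars.strip part)
  if 2 ≤ pieces.length then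
    match PySem.Int.ofChars? (pvRstripW (pieces.getD 1 [])) with
    | some w => if 0 < w then (st.1 ++ [(w, pieces.getD 0 [])], st.2) else st
    | none => st          -- except ValueError: continue
  else if pieces.length = 1 ∧ PySem.Chars.startswith (pieces.getD 0 []) "http".toList = true ∧ st.2 = none then
    (st.1, some (pieces.getD 0 []))
  else st

def best_from_srcset_py_alt (srcset : String) : Option String :=
  let r := (PySem.Chars.splitOn srcset.toList [',']).foldl pvBStep ([], none)
  match r.1 with
  | [] => r.2.map String.ofList
  | c :: rest => some (String.ofList (PySem.List.maxD (c :: rest) (·.1) (0, [])).2)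

-- ===== PRECONDITION & SPEC =====
def Spec_best_from_srcset_py (srcset : String) (out : Option String) : Prop := out = best_from_srcset_py_alt srcset
instance (srcset : String) (out : Option String) : Decidable (Spec_best_from_srcset_py srcset out) := by unfold Spec_best_from_srcset_py; infer_instance

-- ===== CLAIM (what is proved, stated in full; the proofs are below) =====
def Claim_equal_best_from_srcset_py : Prop := ∀ (srcset : String), Dom_best_from_srcset_py srcset → Spec_best_from_srcset_py srcset (best_from_srcset_py srcset)

-- ===== LEMMAS AND PROOFS =====

-- Python's max(c0 :: rest, key=fst): the FIRST maximizer, as a left fold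
def pvPickMax (c0 : Int × List Char) (rest : List (Int × List Char)) : Int × List Char :=
  rest.foldl (fun a x => if a.1 < x.1 then x else a) c0

lemma pvMax?_eq_pickMax (c0 : Int × List Char) (rest : List (Int × List Char)) :
    PySem.List.max? (c0 :: rest) (·.1) = some (pvPickMax c0 rest) := by
  induction rest generalizing c0 with
  | nil => simp [PySem.List.max?, pvPickMax]
  | cons y l ih =>
    have h1 := ih (if c0.1 < y.1 then y else c0)
    by_cases hc : c0.1 < y.1
    · simp only [if_pos hc] at h1
      simp only [PySem.List.max?, List.foldl_cons] at h1 ⊢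
      simp only [pvPickMax, List.foldl_cons, if_pos hc] at h1 ⊢
      simpa [hc] using h1
    · simp only [if_neg hc] at h1
      simp only [PySem.List.max?, List.foldl_cons] at h1 ⊢
      simp only [pvPickMax, List.foldl_cons, if_neg hc] at h1 ⊢
      simpa [hc] using h1

lemma pvMaxD_eq_pickMax (c0 : Int × List Char) (rest : List (Int × List Char)) :
    PySem.List.maxD (c0 :: rest) (·.1) (0, []) = pvPickMax c0 rest := by
  simp [PySem.List.maxD, pvMax?_eq_pickMax]

lemma pvPickMax_append (c0 x : Int × List Char) (rest : List (Int × List Char)) :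
    pvPickMax c0 (rest ++ [x]) =
      if (pvPickMax c0 rest).1 < x.1 then x else pvPickMax c0 rest := by
  simp [pvPickMax, List.foldl_append]

lemma pvPickMax_mem (c0 : Int × List Char) (rest : List (Int × List Char)) :
    pvPickMax c0 rest ∈ c0 :: rest := by
  induction rest generalizing c0 with
  | nil => simp [pvPickMax]
  | cons y l ih =>
    by_cases hc : c0.1 < y.1
    · have h := ih y
      simp only [pvPickMax, List.foldl_cons, if_pos hc] at *
      exact List.mem_cons_of_mem _ h
    · have h := ih c0
      simp only [pvPickMax, List.foldl_cons, if_neg hc] at *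
      rcases List.mem_cons.mp h with h | h
      · exact List.mem_cons.mpr (Or.inl h)
      · exact List.mem_cons_of_mem _ (List.mem_cons_of_mem _ h)

-- every token of str.split() is nonempty
lemma pvSplit₀_go_ne_nil (s cur : List Char) (acc : List (List Char))
    (hacc : ∀ t ∈ acc, t ≠ []) : ∀ t ∈ PySem.Chars.split₀.go s cur acc, t ≠ [] := by
  induction s generalizing cur acc with
  | nil =>
    intro t ht
    simp only [PySem.Chars.split₀.go] at ht
    split at ht
    · exact hacc t (by simpa using ht)
    · rename_i hcur
      simp only [List.mem_reverse, List.mem_cons] at ht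
      rcases ht with h | h
      · subst h; simpa using fun h' => hcur (by simp [h'])
      · exact hacc t h
  | cons c s ih =>
    intro t ht
    simp only [PySem.Chars.split₀.go] at ht
    split at ht
    · split at ht
      · exact ih [] acc hacc t ht
      · rename_i hcur
        refine ih [] (cur.reverse :: acc) ?_ t ht
        intro u hu
        rcases List.mem_cons.mp hu with h | h
        · subst h; simpa using fun h' => hcur (by simp [h'])
        · exact hacc u h
    · exact ih (c :: cur) acc hacc t ht

lemma pvSplit₀_ne_nil (cs : List Char) : ∀ t ∈ PySem.Chars.split₀ cs, t ≠ [] :=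
  pvSplit₀_go_ne_nil cs [] [] (by simp)

-- the invariant tying A's (best_url, best_width) to B's (candidates, fallback)
def pvInv (st : Option (List Char) × Int) (bst : List (Int × List Char) × Option (List Char)) : Prop :=
  match bst.1 with
  | [] => st.1 = bst.2 ∧ st.2 = 0 ∧ (∀ u, bst.2 = some u → u ≠ [])
  | c0 :: rest =>
      st = (some (pvPickMax c0 rest).2, (pvPickMax c0 rest).1) ∧
      (∀ c ∈ c0 :: rest, 0 < c.1 ∧ c.2 ≠ [])

lemma pvStep_inv (st : Option (List Char) × Int) (bst : List (Int × List Char) × Option (List Char))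
    (part : List Char) (h : pvInv st bst) : pvInv (pvAStep st part) (pvBStep bst part) := by
  obtain ⟨stu, stw⟩ := st
  obtain ⟨cands, fb⟩ := bst
  have hne := pvSplit₀_ne_nil (PySem.Chars.strip part)
  simp only [pvAStep, pvBStep]
  generalize hps : PySem.Chars.split₀ (PySem.Chars.strip part) = pieces at hne ⊢
  cases pieces with
  | nil => simpa using h
  | cons p0 tl =>
    have hp0 : p0 ≠ [] := hne p0 (by simp)
    cases tl with
    | cons p1 tl2 =>
      -- len(pieces) >= 2
      simp only [List.length_cons, List.getD_cons_zero, List.getD_cons_succ,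
        if_pos (by omega : 2 ≤ tl2.length + 1 + 1)]
      cases hw : PySem.Int.ofChars? (pvRstripW p1) with
      | none => exact h
      | some w =>
        match hc : cands with
        | [] =>
          obtain ⟨h1, h2, h3⟩ := h
          subst h1 h2
          by_cases hpos : (0 : Int) < w
          · simp only [if_pos hpos, pvInv, List.nil_append]
            refine ⟨by simp [pvPickMax], ?_⟩
            intro c hcmem
            simp only [List.mem_singleton] at hcmem
            subst hcmem
            exact ⟨hpos, hp0⟩
          · simpa [if_neg hpos, pvInv] using h3
        | c0 :: rest =>
          obtain ⟨h1, h2⟩ := h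
          injection h1 with h1a h1b
          subst h1a h1b
          have hmem := pvPickMax_mem c0 rest
          have hposmax : 0 < (pvPickMax c0 rest).1 := (h2 _ hmem).1
          by_cases hpos : (0 : Int) < w
          · simp only [if_pos hpos]
            by_cases hgt : (pvPickMax c0 rest).1 < w
            · simp only [pvInv, List.cons_append, if_pos hgt]
              refine ⟨?_, ?_⟩
              · rw [pvPickMax_append]; simp [hgt]
              · intro c hcmem
                rcases (by simpa using hcmem : c = c0 ∨ c ∈ rest ∨ c = (w, p0)) with hm | hm | hm
                · exact h2 c (by simp [hm])
                · exact h2 c (by simp [hm])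
                · subst hm; exact ⟨hpos, hp0⟩
            · simp only [pvInv, List.cons_append, if_neg hgt]
              refine ⟨?_, ?_⟩
              · rw [pvPickMax_append]; simp [hgt]
              · intro c hcmem
                rcases (by simpa using hcmem : c = c0 ∨ c ∈ rest ∨ c = (w, p0)) with hm | hm | hm
                · exact h2 c (by simp [hm])
                · exact h2 c (by simp [hm])
                · subst hm; exact ⟨hpos, hp0⟩
          · have hng : ¬ (pvPickMax c0 rest).1 < w := by omega
            simp only [if_neg hpos, if_neg hng]
            exact ⟨rfl, h2⟩
    | nil =>
      -- len(pieces) == 1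
      rw [show ("http".toList : List Char) = ['h', 't', 't', 'p'] from rfl]
      simp only [List.length_cons, List.length_nil, Nat.zero_add]
      rw [if_neg (by omega : ¬ (2 : Nat) ≤ 1)]
      rw [if_neg (by omega : ¬ (2 : Nat) ≤ 1)]
      match hc : cands with
      | [] =>
        obtain ⟨h1, h2, h3⟩ := h
        subst h2
        match hfb : fb with
        | none =>
          subst h1
          split_ifs <;>
            first
              | exact ⟨rfl, rfl, fun u hu => by cases hu; exact hp0⟩
              | exact ⟨rfl, rfl, fun u hu => absurd hu (by simp)⟩
              | simp_all
        | some u =>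
          have hu : u ≠ [] := h3 u rfl
          subst h1
          split_ifs <;>
            first
              | exact ⟨by simp [hu], rfl, h3⟩
              | exact ⟨rfl, rfl, h3⟩
              | simp_all
      | c0 :: rest =>
        obtain ⟨h1, h2⟩ := h
        injection h1 with h1a h1b
        subst h1a h1b
        have hne2 : (pvPickMax c0 rest).2 ≠ [] := (h2 _ (pvPickMax_mem c0 rest)).2
        split_ifs <;> exact ⟨by simp [hne2], h2⟩

lemma pvFoldl_inv (parts : List (List Char)) (st : Option (List Char) × Int)
    (bst : List (Int × List Char) × Option (List Char)) (h : pvInv st bst) :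
    pvInv (parts.foldl pvAStep st) (parts.foldl pvBStep bst) := by
  induction parts generalizing st bst with
  | nil => exact h
  | cons p l ih => exact ih _ _ (pvStep_inv st bst p h)

-- ===== VERDICT (by name: the statement is the Claim_ definition above) =====
theorem best_from_srcset_py_spec : Claim_equal_best_from_srcset_py := by
  intro srcset _
  unfold Spec_best_from_srcset_py best_from_srcset_py best_from_srcset_py_alt
  have h := pvFoldl_inv (PySem.Chars.splitOn srcset.toList [',']) (none, 0) ([], none)
    (by simp [pvInv])
  set stA := (PySem.Chars.splitOn srcset.toList [',']).foldl pvAStep (none, 0) with hA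
  set stB := (PySem.Chars.splitOn srcset.toList [',']).foldl pvBStep ([], none) with hB
  unfold pvInv at h
  match hc : stB.1 with
  | [] => rw [hc] at h; simp [h.1, hc]
  | c :: rest => rw [hc] at h; simp [hc, pvMaxD_eq_pickMax, h.1]
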